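-- pv_equiv track=rewrite | github.com/MiguelPerino/semana-05-python | ex07.py | diagonal_principal
-- ===== SOURCE A (Python) =====
-- def diagonal_principal (matriz):
--     #Começa como sendo verdadeira, ou seja, ela ja é quadratica
--     eh_quadrada = True
--     #Se for vazia ela vira false, que nao é quadratica
--     if len(matriz) == 0:
--         #return []
--         eh_quadrada = False
--     #Verifica se a coluna é diferente de linha entao por exemplo se tiver mais coluna em uma linha do que na outra
--     for linha in matriz:
--         if len(linha) != len(matriz):
--             '''if len(linha) != len(matriz):
--             return []'''
--             eh_quadrada = False
--             break
--     #Se nao for quadrada, vai returnar lista vazia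
--     if not eh_quadrada:
--         return []
--     else:
--         #Aqui returna os elementos da diagonal principal
--         dg_princ = []
--         for i in range(len(matriz)):
--             dg_princ.append(matriz[i][i])
--         return dg_princ
-- ===== SOURCE B (Python) =====
-- def diagonal_principal(matriz):
--     n = len(matriz)
--     diag = []
--     for i, linha in enumerate(matriz):
--         if len(linha) != n:
--             return []
--         diag.append(linha[i])
--     return diag
-- ===== Notes on version B (the rewrite author's own statement) =====
-- stated objective: simpler
-- what changed: B fuses A's separate squareness-validation loop and diagonal-reading loop (over range(len)) into one enumerate pass over the rows that validates each row and reads its diagonal element, returning the empty result early on the first bad row.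
import Mathlib
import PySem

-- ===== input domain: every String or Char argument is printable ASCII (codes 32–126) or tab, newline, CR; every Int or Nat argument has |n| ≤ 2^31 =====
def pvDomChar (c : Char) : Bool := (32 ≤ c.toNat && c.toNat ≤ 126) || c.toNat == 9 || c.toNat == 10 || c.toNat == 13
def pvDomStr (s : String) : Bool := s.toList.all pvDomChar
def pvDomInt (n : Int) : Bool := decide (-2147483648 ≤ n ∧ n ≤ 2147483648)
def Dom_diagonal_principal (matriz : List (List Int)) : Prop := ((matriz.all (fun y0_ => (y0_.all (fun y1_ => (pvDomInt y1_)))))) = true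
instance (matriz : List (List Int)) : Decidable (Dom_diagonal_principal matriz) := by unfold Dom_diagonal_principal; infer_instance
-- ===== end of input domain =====

-- B fuses A's validation loop and diagonal loop into one enumerate pass with early return (objective: simpler).

-- ===== PORT A =====
-- A's for-loop with break: stops at the first row whose length differs from n
def pvACheck (n : Int) : List (List Int) → Bool
  | [] => true
  | linha :: rest => if (linha.length : Int) ≠ n then false else pvACheck n rest

def diagonal_principal (matriz : List (List Int)) : List Int :=
  let eh_quadrada := if matriz.length = 0 then false else true
  let eh_quadrada := eh_quadrada && pvACheck (matriz.length : Int) matriz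
  if !eh_quadrada then []
  else
    -- matriz[i][i]: always in range here (squareness already verified), so pyGetD's
    -- defaults are unreachable and this is exact
    (PySem.List.pyRange 0 (matriz.length : Int) 1).foldl
      (fun dg_princ i => dg_princ ++ [PySem.List.pyGetD (PySem.List.pyGetD matriz i []) i 0]) []

-- ===== PORT B =====
-- B's single pass: none models B's early `return []`; linha[i] is in range (len linha = n > i)
def pvBGo (n : Nat) : Nat → List (List Int) → Option (List Int)
  | _, [] => some []
  | i, linha :: rest =>
    if linha.length ≠ n then none
    else (pvBGo n (i + 1) rest).map (fun diag => PySem.List.pyGetD linha (i : Int) 0 :: diag)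

def diagonal_principal_alt (matriz : List (List Int)) : List Int :=
  (pvBGo matriz.length 0 matriz).getD []

-- ===== PRECONDITION & SPEC =====
def Spec_diagonal_principal (matriz : List (List Int)) (out : List Int) : Prop := out = diagonal_principal_alt matriz
instance (matriz : List (List Int)) (out : List Int) : Decidable (Spec_diagonal_principal matriz out) := by unfold Spec_diagonal_principal; infer_instance

-- ===== CLAIM (what is proved, stated in full; the proofs are below) =====
def Claim_equal_diagonal_principal : Prop := ∀ (matriz : List (List Int)), Dom_diagonal_principal matriz → Spec_diagonal_principal matriz (diagonal_principal matriz)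

-- ===== LEMMAS AND PROOFS =====

-- A's break-loop decides "all rows have length n"
theorem pvACheck_eq_all (n : Int) (ls : List (List Int)) :
    pvACheck n ls = ls.all (fun l => (l.length : Int) == n) := by
  induction ls with
  | nil => rfl
  | cons l ls ih =>
    simp only [pvACheck, List.all_cons, ih]
    by_cases h : (l.length : Int) = n <;> simp [h]

-- the diagonal values, row by row, starting at column k (shared shape of both results)
def pvDiag : Nat → List (List Int) → List Int
  | _, [] => []
  | k, l :: ls => PySem.List.pyGetD l (k : Int) 0 :: pvDiag (k + 1) ls

theorem pvBGo_of_all (n : Nat) (k : Nat) (ls : List (List Int))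
    (h : ∀ l ∈ ls, l.length = n) : pvBGo n k ls = some (pvDiag k ls) := by
  induction ls generalizing k with
  | nil => rfl
  | cons l ls ih =>
    have hl : l.length = n := h l (by simp)
    simp [pvBGo, pvDiag, hl, ih (k + 1) (fun x hx => h x (by simp [hx]))]

theorem pvBGo_of_bad (n : Nat) (k : Nat) (ls : List (List Int))
    (h : ¬ ∀ l ∈ ls, l.length = n) : pvBGo n k ls = none := by
  induction ls generalizing k with
  | nil => exact absurd (by simp) h
  | cons l ls ih =>
    by_cases hl : l.length = n
    · have : ¬ ∀ x ∈ ls, x.length = n := fun hall => h (List.forall_mem_cons.mpr ⟨hl, hall⟩)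
      simp [pvBGo, hl, ih (k + 1) this]
    · simp [pvBGo, hl]

theorem pvRangeMap_eq_pvDiag (ls : List (List Int)) (k : Nat) :
    (List.range ls.length).map
      (fun j => PySem.List.pyGetD (ls.getD j []) ((k + j : Nat) : Int) 0) = pvDiag k ls := by
  induction ls generalizing k with
  | nil => rfl
  | cons l ls ih =>
    simp only [List.length_cons, List.range_succ_eq_map, List.map_cons, List.map_map]
    simp only [pvDiag, Nat.add_zero]
    refine congrArg _ ?_
    rw [← ih (k + 1)]
    refine List.map_congr_left (fun j _ => ?_)
    simp only [Function.comp_apply, List.getD_cons_succ]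
    congr 2
    omega

theorem diagonal_principal_spec : Claim_equal_diagonal_principal := by
  intro matriz _
  unfold Spec_diagonal_principal diagonal_principal diagonal_principal_alt
  rw [pvACheck_eq_all]
  by_cases hall : ∀ l ∈ matriz, l.length = matriz.length
  · cases matriz with
    | nil => rfl
    | cons l ls =>
      have hall' : ((l :: ls).all (fun x => (x.length : Int) == ((l :: ls).length : Int))) = true := by
        simp only [List.all_eq_true]
        intro x hx
        have := hall x hx
        simp only [beq_iff_eq]
        exact_mod_cast this
      rw [pvBGo_of_all _ 0 _ hall]
      simp only [hall', List.length_eq_zero_iff, Option.getD_some]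
      rw [PySem.List.foldl_append_singleton_eq_map, List.nil_append,
        PySem.List.pyRange_zero_natCast]
      simp only [List.map_map]
      rw [← pvRangeMap_eq_pvDiag (l :: ls) 0]
      refine List.map_congr_left (fun j hj => ?_)
      simp only [Function.comp_apply, Nat.zero_add]
      rw [PySem.List.pyGetD_natCast]
      simp
  · have hbad : ((matriz.all (fun x => (x.length : Int) == (matriz.length : Int)))) = false := by
      rw [Bool.eq_false_iff]
      intro hc
      exact hall (fun x hx => by
        have := List.all_eq_true.mp hc x hx
        exact_mod_cast beq_iff_eq.mp this)
    rw [pvBGo_of_bad _ 0 _ hall]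
    simp [hbad]
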